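-- pv_equiv track=rewrite | github.com/mroyal1997/mroyal1997.github.io | other/ancestryApplication/ancestryPythonQuestions.py | reorderStringByCharCounts
-- ===== SOURCE A (Python) =====
-- def createCharCountMap(string="Bubble"):
--     charMap = {}
--     for char in string:
--         charMap[char.lower()] = charMap.get(char.lower(), 0) + 1
--     return charMap
--
-- def reorderStringByCharCounts(string="Bubble"):
--     charMap = createCharCountMap(string)
--     toReturn = ""
--     minCount = min(list(charMap.items()), key=lambda x: x[1])[1]
--     maxCount = max(list(charMap.items()), key=lambda x: x[1])[1]
--     for charCount in range(minCount, maxCount + 1):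
--         for char in string:
--             if charMap[char.lower()] == charCount:
--                 toReturn += char
--     return toReturn
-- ===== SOURCE B (Python) =====
-- def createCharCountMap(string="Bubble"):
--     charMap = {}
--     for char in string:
--         charMap[char.lower()] = charMap.get(char.lower(), 0) + 1
--     return charMap
--
-- def reorderStringByCharCounts(string="Bubble"):
--     charMap = createCharCountMap(string)
--     buckets = {}
--     for char in string:
--         c = charMap[char.lower()]
--         buckets[c] = buckets.get(c, '') + char
--     minCount = min(charMap.values())
--     maxCount = max(charMap.values())
--     toReturn = ''
--     for charCount in range(minCount, maxCount + 1):
--         toReturn += buckets.get(charCount, '')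
--     return toReturn
-- ===== Notes on version B (the rewrite author's own statement) =====
-- stated objective: faster
-- what changed: Instead of rescanning the whole string once per count value from min to max, B makes a single bucketing pass (buckets[count] += char) and then concatenates buckets.get(c,'') for c in range(min,max+1); min/max are taken directly over charMap.values().
-- outside the precondition, e.g. on reorderStringByCharCounts(''): A raises ValueError, B raises ValueError
import Mathlib
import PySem

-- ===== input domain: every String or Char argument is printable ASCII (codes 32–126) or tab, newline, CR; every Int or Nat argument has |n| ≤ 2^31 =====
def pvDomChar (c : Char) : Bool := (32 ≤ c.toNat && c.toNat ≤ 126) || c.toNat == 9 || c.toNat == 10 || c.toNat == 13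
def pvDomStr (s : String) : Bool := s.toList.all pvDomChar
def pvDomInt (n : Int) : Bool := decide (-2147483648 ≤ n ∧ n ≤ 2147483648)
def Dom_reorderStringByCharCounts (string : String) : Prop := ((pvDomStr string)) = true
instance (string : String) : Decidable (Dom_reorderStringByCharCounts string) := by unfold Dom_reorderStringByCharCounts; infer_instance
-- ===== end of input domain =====

-- B replaces A's per-count rescans of the whole string by one bucketing pass plus one
-- assembly pass over range(min,max+1): an asymptotic improvement, same return value.


-- ===== PORT A =====
-- helper shared by both Pythons: charMap[char.lower()] = charMap.get(char.lower(), 0) + 1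
def createCharCountMap (string : String) : PySem.Dict Char Int :=
  string.toList.foldl
    (fun d ch => d.insert (PySem.Chars.lowerChar ch) (d.getD (PySem.Chars.lowerChar ch) 0 + 1))
    PySem.Dict.empty

-- charMap[char.lower()] never raises KeyError (the key was inserted from the same string),
-- so '(get? …).getD 0' is exact; the 'none' branches of min/max are Python's ValueError on
-- the empty string, excluded by Pre_.
def reorderStringByCharCounts (string : String) : String :=
  let charMap := createCharCountMap string
  match PySem.List.min? charMap.items (fun x => x.2), PySem.List.max? charMap.items (fun x => x.2) with
  | some mn, some mx =>
      String.mk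
        ((PySem.List.pyRange mn.2 (mx.2 + 1) 1).foldl
          (fun toReturn charCount =>
            string.toList.foldl
              (fun toReturn ch =>
                if ((charMap.get? (PySem.Chars.lowerChar ch)).getD 0) == charCount
                then toReturn ++ [ch] else toReturn)
              toReturn)
          [])
  | _, _ => ""

-- ===== PORT B =====
-- B keeps the helper createCharCountMap (its own copy, so the ports stay independent)
def createCharCountMap_alt (string : String) : PySem.Dict Char Int :=
  string.toList.foldl
    (fun d ch => d.insert (PySem.Chars.lowerChar ch) (d.getD (PySem.Chars.lowerChar ch) 0 + 1))
    PySem.Dict.empty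

-- same KeyError remark for charMap[char.lower()]; 'none' branch = ValueError on "", outside Pre_.
def reorderStringByCharCounts_alt (string : String) : String :=
  let charMap := createCharCountMap_alt string
  let buckets : PySem.Dict Int (List Char) :=
    string.toList.foldl
      (fun d ch =>
        let c := (charMap.get? (PySem.Chars.lowerChar ch)).getD 0
        d.insert c (d.getD c [] ++ [ch]))
      PySem.Dict.empty
  match PySem.List.min? charMap.values (fun v => v) with
  | none => ""
  | some mn =>
    match PySem.List.max? charMap.values (fun v => v) with
    | none => ""
    | some mx =>
      String.mk
        ((PySem.List.pyRange mn (mx + 1) 1).foldl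
          (fun toReturn charCount => toReturn ++ buckets.getD charCount []) [])

-- ===== PRECONDITION & SPEC =====
-- Python A raises ValueError (min of an empty sequence) exactly on the empty string.
def Pre_reorderStringByCharCounts (string : String) : Prop := string ≠ ""
instance (string : String) : Decidable (Pre_reorderStringByCharCounts string) := by unfold Pre_reorderStringByCharCounts; infer_instance
def pvWitness_reorderStringByCharCounts : String := "Bubble"

def Spec_reorderStringByCharCounts (string : String) (out : String) : Prop := out = reorderStringByCharCounts_alt string
instance (string : String) (out : String) : Decidable (Spec_reorderStringByCharCounts string out) := by unfold Spec_reorderStringByCharCounts; infer_instance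

-- ===== CLAIM (what is proved, stated in full; the proofs are below) =====
def Claim_equal_reorderStringByCharCounts : Prop := ∀ (string : String), Dom_reorderStringByCharCounts string → Pre_reorderStringByCharCounts string → Spec_reorderStringByCharCounts string (reorderStringByCharCounts string)

-- ===== LEMMAS AND PROOFS =====

-- B's bucketing loop, read back: bucket c holds exactly the chars of the string whose count is c.
theorem buckets_getD (key : Char → Int) (l : List Char) (d : PySem.Dict Int (List Char)) (c : Int) :
    (l.foldl (fun d ch => d.insert (key ch) (d.getD (key ch) [] ++ [ch])) d).getD c []
      = d.getD c [] ++ l.filter (fun ch => key ch == c) := by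
  induction l generalizing d with
  | nil => simp
  | cons ch t ih =>
      simp only [List.foldl_cons, List.filter_cons, ih, PySem.Dict.getD_insert]
      by_cases h : key ch = c
      · simp [h]
      · have : (key ch == c) = false := by simp [h]
        simp [Ne.symm h, this]

-- the first min/max pair of items has the min/max VALUE of the dict
theorem min_items_val (d : PySem.Dict Char Int) (mn : Char × Int) (v : Int)
    (h1 : PySem.List.min? d.items (fun x => x.2) = some mn)
    (h2 : PySem.List.min? d.values (fun x => x) = some v) : mn.2 = v := by
  have hmem1 := PySem.List.min?_mem h1
  have hmem2 := PySem.List.min?_mem h2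
  have hmin1 := PySem.List.min?_isMin h1
  have hmin2 := PySem.List.min?_isMin h2
  have hvals : d.values = d.items.map (fun x => x.2) := rfl
  apply le_antisymm
  · rcases List.mem_map.mp (hvals ▸ hmem2) with ⟨y, hy, hyv⟩
    exact hyv ▸ hmin1 y hy
  · exact hmin2 _ (hvals ▸ List.mem_map_of_mem hmem1)

theorem max_items_val (d : PySem.Dict Char Int) (mx : Char × Int) (v : Int)
    (h1 : PySem.List.max? d.items (fun x => x.2) = some mx)
    (h2 : PySem.List.max? d.values (fun x => x) = some v) : mx.2 = v := by
  have hmem1 := PySem.List.max?_mem h1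
  have hmem2 := PySem.List.max?_mem h2
  have hmax1 := PySem.List.max?_isMax h1
  have hmax2 := PySem.List.max?_isMax h2
  have hvals : d.values = d.items.map (fun x => x.2) := rfl
  apply le_antisymm
  · exact hmax2 _ (hvals ▸ List.mem_map_of_mem hmem1)
  · rcases List.mem_map.mp (hvals ▸ hmem2) with ⟨y, hy, hyv⟩
    exact hyv ▸ hmax1 y hy

theorem charMap_items_ne_nil (s : String) (hs : s ≠ "") : (createCharCountMap s).items ≠ [] := by
  have hl : s.toList ≠ [] := by
    intro h; exact hs (String.toList_eq_nil_iff.mp h)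
  intro h
  have hkeys : (createCharCountMap s).keys = PySem.Set.update (PySem.Dict.empty : PySem.Dict Char Int).keys (s.toList.map PySem.Chars.lowerChar) :=
    PySem.Dict.keys_foldl_insert_key s.toList PySem.Chars.lowerChar _ _
  rcases List.exists_mem_of_ne_nil _ hl with ⟨ch, hch⟩
  have : PySem.Chars.lowerChar ch ∈ (createCharCountMap s).keys := by
    rw [hkeys]
    exact (PySem.Set.mem_update _ _ _).mpr (Or.inr (List.mem_map_of_mem hch))
  rw [show (createCharCountMap s).keys = (createCharCountMap s).items.map (fun p => p.1) from rfl, h] at this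
  simp at this

-- ===== VERDICT (by name: the statement is the Claim_ definition above) =====
theorem reorderStringByCharCounts_spec : Claim_equal_reorderStringByCharCounts := by
  intro s _ hpre
  unfold Spec_reorderStringByCharCounts reorderStringByCharCounts reorderStringByCharCounts_alt
  rw [show createCharCountMap_alt s = createCharCountMap s from rfl]
  have hne := charMap_items_ne_nil s hpre
  set cm := createCharCountMap s with hcm
  have hvne : cm.values ≠ [] := by
    intro h
    exact hne (List.map_eq_nil_iff.mp (show cm.items.map (fun x => x.2) = [] from h))
  rcases Option.ne_none_iff_exists'.mp (fun h => hne ((PySem.List.min?_eq_none_iff cm.items (fun x => x.2)).mp h)) with ⟨mn, hmn⟩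
  rcases Option.ne_none_iff_exists'.mp (fun h => hne ((PySem.List.max?_eq_none_iff cm.items (fun x => x.2)).mp h)) with ⟨mx, hmx⟩
  rcases Option.ne_none_iff_exists'.mp (fun h => hvne ((PySem.List.min?_eq_none_iff cm.values (fun x => x)).mp h)) with ⟨vmn, hvmn⟩
  rcases Option.ne_none_iff_exists'.mp (fun h => hvne ((PySem.List.max?_eq_none_iff cm.values (fun x => x)).mp h)) with ⟨vmx, hvmx⟩
  simp only []
  rw [hmn, hmx, hvmn, hvmx]
  dsimp only
  rw [min_items_val cm mn vmn hmn hvmn, max_items_val cm mx vmx hmx hvmx]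
  congr 1
  apply (PySem.List.foldl_congr_mem _ _ _ _ ?_).symm
  intro acc c _
  rw [buckets_getD (fun ch => (cm.get? (PySem.Chars.lowerChar ch)).getD 0) s.toList PySem.Dict.empty c]
  rw [PySem.List.foldl_append_if (fun ch => ((cm.get? (PySem.Chars.lowerChar ch)).getD 0) == c) (fun ch => ch) s.toList acc]
  simp
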